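-- pv_equiv track=rewrite | github.com/fox846/foxlp | Question41_48.py | generate_TAC
-- ===== SOURCE A (Python) =====
-- precedence = {'^': 3, '*': 2, '/': 2, '+': 1, '-': 1}
--
-- def generate_TAC(postfix):
--     stack = []
--     temp_count = 1
--     code = []
--
--     for token in postfix:
--         if token not in precedence:
--             stack.append(token)
--         else:
--             op2 = stack.pop()
--             op1 = stack.pop()
--             temp = f't{temp_count}'
--             code.append(f'{temp} = {op1} {token} {op2}')
--             stack.append(temp)
--             temp_count += 1
--     return code, stack.pop()
-- ===== SOURCE B (Python) =====
-- precedence = {'^': 3, '*': 2, '/': 2, '+': 1, '-': 1}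
--
-- def generate_TAC(postfix):
--     # Build an explicit expression forest, then emit code by a post-order walk.
--     stack = []
--     for token in postfix:
--         if token in precedence:
--             r = stack.pop()
--             l = stack.pop()
--             stack.append((token, l, r))
--         else:
--             stack.append(token)
--
--     code = []
--     counter = 1
--
--     def gen(node):
--         nonlocal counter
--         if isinstance(node, str):
--             return node
--         op, l, r = node
--         ln = gen(l)
--         rn = gen(r)
--         t = f't{counter}'
--         counter += 1
--         code.append(f'{t} = {ln} {op} {rn}')
--         return t
--
--     names = [gen(tree) for tree in stack]
--     return code, names[-1]
-- ===== Notes on version B (the rewrite author's own statement) =====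
-- stated objective: alternative
-- what changed: B builds an explicit expression tree forest from the postfix tokens in one pass and then emits the three-address code by a recursive post-order walk with a shared temp counter, instead of A's single-pass simulation that keeps a stack of operand/temp names and emits code inline.
-- outside the precondition, e.g. on generate_TAC([]): A raises IndexError, B raises IndexError
import Mathlib
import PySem

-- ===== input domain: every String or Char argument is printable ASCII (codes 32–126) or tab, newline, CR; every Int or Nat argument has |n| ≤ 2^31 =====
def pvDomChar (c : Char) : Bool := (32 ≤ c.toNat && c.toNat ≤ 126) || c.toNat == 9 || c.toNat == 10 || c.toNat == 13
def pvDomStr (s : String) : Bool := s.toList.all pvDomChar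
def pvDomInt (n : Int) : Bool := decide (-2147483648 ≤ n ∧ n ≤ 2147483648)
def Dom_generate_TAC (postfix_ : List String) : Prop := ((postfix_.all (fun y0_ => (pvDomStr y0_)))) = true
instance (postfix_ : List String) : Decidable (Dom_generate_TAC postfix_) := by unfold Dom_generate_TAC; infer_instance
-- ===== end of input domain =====

-- B builds an explicit expression forest and emits the code by a post-order walk, instead of
-- A's simulation of the run-time stack of names; equal cost, different decomposition (alternative).

-- ===== PORT A =====
def precedence : PySem.Dict String Int :=
  PySem.Dict.ofList [("^", 3), ("*", 2), ("/", 2), ("+", 1), ("-", 1)]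

-- one iteration of A's for-loop; `none` = an IndexError from stack.pop() has propagated
def stepA (acc : Option (List String × Int × List String)) (token : String) :
    Option (List String × Int × List String) :=
  match acc with
  | none => none
  | some (stack, temp_count, code) =>
    if (precedence.get? token).isSome then
      match stack with
      | op2 :: op1 :: rest =>
        let temp := "t" ++ PySem.Int.toStr temp_count
        some (temp :: rest, temp_count + 1,
              code ++ [temp ++ " = " ++ op1 ++ " " ++ token ++ " " ++ op2])
      | _ => none
    else
      some (token :: stack, temp_count, code)

def generate_TAC (postfix_ : List String) : List String × String :=
  match postfix_.foldl stepA (some ([], (1 : Int), [])) with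
  | some (top :: _, _, code) => (code, top)
  | _ => ([], "")   -- IndexError (underflow or empty final stack): excluded by Pre_

-- ===== PORT B =====
inductive PTree : Type
  | leaf : String → PTree
  | node : String → PTree → PTree → PTree
deriving DecidableEq, Repr

-- one iteration of B's tree-building loop (head of the list = top of the stack)
def stepB (acc : Option (List PTree)) (token : String) : Option (List PTree) :=
  match acc with
  | none => none
  | some stack =>
    if (precedence.get? token).isSome then
      match stack with
      | r :: l :: rest => some (PTree.node token l r :: rest)
      | _ => none
    else
      some (PTree.leaf token :: stack)

-- post-order walk of one tree: returns (name, counter, code) threading counter and code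
def gen : PTree → Int → List String → String × Int × List String
  | PTree.leaf s, c, code => (s, c, code)
  | PTree.node op l r, c, code =>
    let (ln, c1, code1) := gen l c code
    let (rn, c2, code2) := gen r c1 code1
    let t := "t" ++ PySem.Int.toStr c2
    (t, c2 + 1, code2 ++ [t ++ " = " ++ ln ++ " " ++ op ++ " " ++ rn])

-- the list comprehension [gen(tree) for tree in stack]
def genForest : List PTree → Int → List String → List String × Int × List String
  | [], c, code => ([], c, code)
  | t :: ts, c, code =>
    let (n, c1, code1) := gen t c code
    let (ns, c2, code2) := genForest ts c1 code1
    (n :: ns, c2, code2)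

def generate_TAC_alt (postfix_ : List String) : List String × String :=
  match postfix_.foldl stepB (some []) with
  | none => ([], "")   -- IndexError during tree building: excluded by Pre_
  | some stack =>
    let (names, _, code) := genForest stack.reverse 1 []
    match names.getLast? with
    | some nm => (code, nm)
    | none => ([], "")  -- names[-1] on empty: excluded by Pre_

-- ===== PRECONDITION & SPEC =====
-- Pre_ excludes exactly the inputs where A raises IndexError: an operator reached with fewer
-- than two values on the stack, or an empty input (final stack.pop() on []).
def Pre_generate_TAC (postfix_ : List String) : Prop :=
  postfix_ ≠ [] ∧
  ∀ i, (h : i < postfix_.length) → (precedence.get? postfix_[i]).isSome →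
    2 ≤ (((postfix_.take i).map
          (fun t => if (precedence.get? t).isSome then (-1 : Int) else 1)).sum)
instance (postfix_ : List String) : Decidable (Pre_generate_TAC postfix_) := by
  unfold Pre_generate_TAC; infer_instance

def pvWitness_generate_TAC : List String := ["a", "b", "+", "c", "*"]

def Spec_generate_TAC (postfix_ : List String) (out : List String × String) : Prop := out = generate_TAC_alt postfix_
instance (postfix_ : List String) (out : List String × String) : Decidable (Spec_generate_TAC postfix_ out) := by unfold Spec_generate_TAC; infer_instance

-- ===== CLAIM (what is proved, stated in full; the proofs are below) =====
def Claim_equal_generate_TAC : Prop := ∀ (postfix_ : List String), Dom_generate_TAC postfix_ → Pre_generate_TAC postfix_ → Spec_generate_TAC postfix_ (generate_TAC postfix_)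

-- ===== LEMMAS AND PROOFS =====

-- the invariant linking A's stack of names to B's stack of trees
def StInv : Option (List String × Int × List String) → Option (List PTree) → Prop
  | none, none => True
  | some (stack, tc, code), some ts =>
      let g := genForest ts.reverse 1 []
      stack = g.1.reverse ∧ tc = g.2.1 ∧ code = g.2.2
  | _, _ => False

theorem genForest_append (xs ys : List PTree) (c : Int) (code : List String) :
    genForest (xs ++ ys) c code =
      let g1 := genForest xs c code
      let g2 := genForest ys g1.2.1 g1.2.2
      (g1.1 ++ g2.1, g2.2) := by
  induction xs generalizing c code with
  | nil => simp [genForest]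
  | cons t ts ih =>
    simp only [List.cons_append, genForest]
    obtain ⟨n, c1, code1⟩ := gen t c code
    simp only [ih]

theorem inv_step (sa : Option (List String × Int × List String)) (sb : Option (List PTree))
    (token : String) (h : StInv sa sb) : StInv (stepA sa token) (stepB sb token) := by
  match sa, sb with
  | none, none => simp [stepA, stepB, StInv]
  | none, some _ => exact absurd h (by simp [StInv])
  | some (stack, tc, code), none => exact absurd h (by simp [StInv])
  | some (stack, tc, code), some ts =>
    simp only [StInv] at h
    obtain ⟨hs, htc, hcode⟩ := h
    simp only [stepA, stepB]
    by_cases hop : (precedence.get? token).isSome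
    · simp only [hop, if_true]
      match ts with
      | [] =>
        simp only [List.reverse_nil, genForest] at hs
        subst hs
        simp [StInv]
      | [t] =>
        simp only [List.reverse_cons, List.reverse_nil, List.nil_append, genForest] at hs
        rcases hl : gen t 1 [] with ⟨n, c1, code1⟩
        rw [hl] at hs
        subst hs
        simp [StInv]
      | r :: l :: rest =>
        have hrev : (r :: l :: rest).reverse = rest.reverse ++ [l, r] := by simp
        have hrev' : (PTree.node token l r :: rest).reverse
            = rest.reverse ++ [PTree.node token l r] := by simp
        rw [hrev, genForest_append] at hs htc hcode
        rcases hg : genForest rest.reverse 1 [] with ⟨ns, c, cd⟩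
        rw [hg] at hs htc hcode
        simp only [genForest] at hs htc hcode
        rcases hl : gen l c cd with ⟨ln, c1, cd1⟩
        rw [hl] at hs htc hcode
        rcases hr : gen r c1 cd1 with ⟨rn, c2, cd2⟩
        rw [hr] at hs htc hcode
        simp only [List.reverse_append, List.reverse_cons, List.reverse_nil,
          List.nil_append, List.cons_append] at hs htc hcode
        subst hs htc hcode
        simp only [StInv, hrev', genForest_append, hg, genForest, gen, hl, hr]
        simp
    · rw [Bool.not_eq_true] at hop
      rcases hg : genForest ts.reverse 1 [] with ⟨ns, c, cd⟩
      rw [hg] at hs htc hcode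
      subst hs htc hcode
      have hrev : (PTree.leaf token :: ts).reverse = ts.reverse ++ [PTree.leaf token] := by simp
      simp only [hop, Bool.false_eq_true, if_false, StInv, hrev]
      rw [genForest_append]
      simp [hg, genForest, gen]

theorem inv_fold (l : List String) (sa : Option (List String × Int × List String))
    (sb : Option (List PTree)) (h : StInv sa sb) :
    StInv (l.foldl stepA sa) (l.foldl stepB sb) := by
  induction l generalizing sa sb with
  | nil => exact h
  | cons t ts ih => exact ih _ _ (inv_step sa sb t h)

-- ===== VERDICT (by name: the statement is the Claim_ definition above) =====
theorem generate_TAC_spec : Claim_equal_generate_TAC := by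
  intro postfix_ _ _
  unfold Spec_generate_TAC generate_TAC generate_TAC_alt
  have h := inv_fold postfix_ (some ([], 1, [])) (some []) (by simp [StInv, genForest])
  rcases hA : postfix_.foldl stepA (some ([], 1, [])) with _ | ⟨stack, tc, code⟩ <;>
    rcases hB : postfix_.foldl stepB (some []) with _ | ts <;>
    rw [hA, hB] at h <;> simp only []
  · exact absurd h (by simp [StInv])
  · exact absurd h (by simp [StInv])
  · simp only [StInv] at h
    obtain ⟨hs, htc, hcode⟩ := h
    subst hs htc hcode
    rw [List.getLast?_eq_head?_reverse]
    rcases hnr : (genForest ts.reverse 1 []).1.reverse with _ | ⟨top, rest⟩ <;> simp
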